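-- pv_equiv track=rewrite | github.com/Sup3Legacy/pyVortaro | vortoParser.py | checkIndic
-- ===== SOURCE A (Python) =====
-- def checkIndic(word):
--     if len(word) == 0:
--         return (-2, 0)
--     if word[0] == '\'':
--         return ((-2), 0)
--     if word[0] != "_":
--         return  ((-1), 0)
--     pred = 0
--     taille = 1
--     for i in range(1, len(word)):
--         if word[i] in ['0', '1', '2', '3', '4', '5', '6', '7', '8', '9']:
--             pred = 10 * pred + int(word[i])
--             taille += 1
--         else:
--             break
--     return (pred, taille)
-- ===== SOURCE B (Python) =====
-- def checkIndic(word):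
--     if not word or word[0] == "'":
--         return (-2, 0)
--     if word[0] != "_":
--         return (-1, 0)
--     rest = word[1:]
--     k = next((i for i, c in enumerate(rest) if c not in "0123456789"), len(rest))
--     pred = sum((ord(c) - 48) * 10 ** (k - 1 - i) for i, c in enumerate(rest[:k]))
--     return (pred, k + 1)
-- ===== Notes on version B (the rewrite author's own statement) =====
-- stated objective: alternative
-- what changed: B first locates the end of the digit run (next over enumerate), slices it off, and converts it in one positional weighted sum, instead of A's digit-by-digit Horner accumulation inside a loop with break.
import Mathlib
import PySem

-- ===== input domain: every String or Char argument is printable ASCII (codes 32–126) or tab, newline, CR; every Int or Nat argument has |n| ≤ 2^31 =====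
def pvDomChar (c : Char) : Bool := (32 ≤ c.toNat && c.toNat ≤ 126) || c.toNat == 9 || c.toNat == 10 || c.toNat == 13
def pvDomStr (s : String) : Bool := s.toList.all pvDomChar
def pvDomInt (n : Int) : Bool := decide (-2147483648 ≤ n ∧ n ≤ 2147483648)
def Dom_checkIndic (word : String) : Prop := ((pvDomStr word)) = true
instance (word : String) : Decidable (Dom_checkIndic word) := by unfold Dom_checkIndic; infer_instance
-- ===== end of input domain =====

-- B replaces A's digit-by-digit Horner accumulation-with-break by: find the digit-run boundary,
-- slice it off, and convert it with one positional weighted sum (objective: alternative decomposition).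

-- ===== PORT A =====
-- the loop 'for i in range(1, len(word)): … else: break' over the characters after the marker
def checkIndicLoop : List Char → Int → Int → Int × Int
  | [], pred, taille => (pred, taille)
  | c :: cs, pred, taille =>
    if c ∈ ['0', '1', '2', '3', '4', '5', '6', '7', '8', '9'] then
      -- int(word[i]) on a single digit character is ord(c) - 48 (exact on '0'..'9')
      checkIndicLoop cs (10 * pred + ((c.toNat : Int) - 48)) (taille + 1)
    else (pred, taille)

def checkIndic (word : String) : Int × Int :=
  match word.toList with
  | [] => (-2, 0)
  | c :: cs =>
    if c = '\'' then (-2, 0)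
    else if c ≠ '_' then (-1, 0)
    else checkIndicLoop cs 0 1

-- ===== PORT B =====
def checkIndic_alt (word : String) : Int × Int :=
  match word.toList with
  | [] => (-2, 0)
  | c :: _ =>
    if c = '\'' then (-2, 0)
    else if c ≠ '_' then (-1, 0)
    else
      let rest := word.toList.tail                     -- word[1:]
      -- next((i for i, c in enumerate(rest) if c not in "0123456789"), len(rest))
      let k : Int := ((List.findIdx? (fun ch => !(decide (ch ∈ "0123456789".toList))) rest).getD rest.length : Nat)
      let digits := PySem.List.slice rest none (some k)  -- rest[:k]
      -- sum((ord(c) - 48) * 10 ** (k - 1 - i) for i, c in enumerate(rest[:k]))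
      let pred := ((PySem.List.enumerate digits).map
        (fun p => ((p.2.toNat : Int) - 48) * 10 ^ ((k - 1 - p.1).toNat))).sum
      (pred, k + 1)

-- ===== PRECONDITION & SPEC =====
def Spec_checkIndic (word : String) (out : Int × Int) : Prop := out = checkIndic_alt word
instance (word : String) (out : Int × Int) : Decidable (Spec_checkIndic word out) := by unfold Spec_checkIndic; infer_instance

-- ===== CLAIM (what is proved, stated in full; the proofs are below) =====
def Claim_equal_checkIndic : Prop := ∀ (word : String), Dom_checkIndic word → Spec_checkIndic word (checkIndic word)

-- ===== LEMMAS AND PROOFS =====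

def pvIsDig (c : Char) : Bool := decide (c ∈ ['0', '1', '2', '3', '4', '5', '6', '7', '8', '9'])

def pvHorner : List Char → Int → Int
  | [], pred => pred
  | c :: cs, pred => pvHorner cs (10 * pred + ((c.toNat : Int) - 48))

theorem pvHorner_split (ds : List Char) : ∀ pred : Int,
    pvHorner ds pred = pred * 10 ^ ds.length + pvHorner ds 0 := by
  induction ds with
  | nil => intro pred; simp [pvHorner]
  | cons c cs ih =>
    intro pred
    simp only [pvHorner, List.length_cons]
    rw [ih (10 * pred + _), ih ((10 : Int) * 0 + _)]
    ring

theorem pvLoop_eq (cs : List Char) : ∀ pred taille : Int,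
    checkIndicLoop cs pred taille =
      (pvHorner (cs.takeWhile pvIsDig) pred, taille + (cs.takeWhile pvIsDig).length) := by
  induction cs with
  | nil => intro pred taille; simp [checkIndicLoop, pvHorner]
  | cons c cs ih =>
    intro pred taille
    by_cases h : pvIsDig c
    · have hm : c ∈ ['0', '1', '2', '3', '4', '5', '6', '7', '8', '9'] := by
        simpa [pvIsDig] using h
      rw [List.takeWhile_cons_of_pos h]
      simp only [checkIndicLoop, if_pos hm, ih, pvHorner, List.length_cons, Prod.mk.injEq]
      exact ⟨trivial, by push_cast; ring⟩
    · have hm : c ∉ ['0', '1', '2', '3', '4', '5', '6', '7', '8', '9'] := by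
        simpa [pvIsDig] using h
      rw [List.takeWhile_cons_of_neg h]
      simp only [checkIndicLoop]
      rw [if_neg hm]
      simp [pvHorner]

theorem pvFindIdx_eq (cs : List Char) :
    ((List.findIdx? (fun ch => !pvIsDig ch) cs).getD cs.length) =
      (cs.takeWhile pvIsDig).length := by
  induction cs with
  | nil => simp
  | cons c cs ih =>
    by_cases h : pvIsDig c
    · rw [List.findIdx?_cons]
      simp only [h, Bool.not_true, List.takeWhile_cons, List.length_cons]
      cases hf : List.findIdx? (fun ch => !pvIsDig ch) cs with
      | none => simpa [hf] using ih
      | some j => simpa [hf] using ih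
    · simp [List.findIdx?_cons, h]

theorem pvTake_takeWhile (cs : List Char) (p : Char → Bool) :
    cs.take ((cs.takeWhile p).length) = cs.takeWhile p := by
  induction cs with
  | nil => simp
  | cons c cs ih =>
    by_cases h : p c
    · simp [h, ih]
    · simp [h]

theorem pvSumEnum (ds : List Char) : ∀ (s e : Int), e = s + ds.length - 1 →
    ((PySem.List.enumerate ds s).map
        (fun p => ((p.2.toNat : Int) - 48) * 10 ^ ((e - p.1).toNat))).sum
      = pvHorner ds 0 := by
  induction ds with
  | nil => intro s e _; simp [PySem.List.enumerate, pvHorner]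
  | cons c cs ih =>
    intro s e he
    have he' : e = (s + 1) + (cs.length : Int) - 1 := by
      simp only [List.length_cons] at he; push_cast at he ⊢; omega
    have hexp : (e - s).toNat = cs.length := by omega
    simp only [PySem.List.enumerate, List.map_cons, List.sum_cons, ih (s + 1) e he', hexp]
    rw [show pvHorner (c :: cs) 0 = pvHorner cs ((c.toNat : Int) - 48) from by
      simp [pvHorner]]
    rw [pvHorner_split cs ((c.toNat : Int) - 48)]

theorem pvDigList : "0123456789".toList = ['0', '1', '2', '3', '4', '5', '6', '7', '8', '9'] := by
  decide

-- ===== VERDICT (by name: the statement is the Claim_ definition above) =====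
theorem checkIndic_spec : Claim_equal_checkIndic := by
  intro word _
  unfold Spec_checkIndic checkIndic checkIndic_alt
  cases hw : word.toList with
  | nil => rfl
  | cons c cs =>
    by_cases h1 : c = '\''
    · simp [h1]
    · by_cases h2 : c = '_'
      · have hpred :
            (fun ch => !(decide (ch ∈ "0123456789".toList))) = (fun ch => !pvIsDig ch) := by
          funext ch; simp [pvDigList, pvIsDig]
        simp only [h2, ne_eq, not_true_eq_false, if_false, List.tail_cons, hpred]
        rw [pvLoop_eq]
        set t := cs.takeWhile pvIsDig with ht
        have hk : ((List.findIdx? (fun ch => !pvIsDig ch) cs).getD cs.length) = t.length :=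
          pvFindIdx_eq cs
        rw [hk, PySem.List.slice_to_natCast, pvTake_takeWhile]
        have hsum := pvSumEnum t 0 ((t.length : Int) - 1) (by ring)
        rw [hsum, if_neg (by decide : ¬ ('_' = '\'')), if_neg (by decide : ¬ ('_' = '\'')),
          Prod.mk.injEq]
        exact ⟨rfl, by ring⟩
      · simp [h1, h2]
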